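-- pv_equiv track=rewrite | github.com/AhmedRashed2811/ToP_2 | ToP/services/project_web_config_service.py | _clean_allowed_years
-- ===== SOURCE A (Python) =====
-- from typing import Any, Dict, Optional, List
--
-- def _clean_allowed_years(raw_list: List[str]) -> List[int]:
--     years: List[int] = []
--     seen = set()
--
--     for item in (raw_list or []):
--         try:
--             n = int(item)
--         except (TypeError, ValueError):
--             continue
--
--         if 1 <= n <= 12 and n not in seen:
--             seen.add(n)
--             years.append(n)
--
--     return sorted(years)
-- ===== SOURCE B (Python) =====
-- from typing import List
--
-- def _clean_allowed_years(raw_list: List[str]) -> List[int]: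
--     nums: List[int] = []
--     for item in (raw_list or []):
--         try:
--             nums.append(int(item))
--         except (TypeError, ValueError):
--             pass
--     nums.sort()
--     out: List[int] = []
--     for n in nums:
--         if 1 <= n <= 12 and (not out or out[-1] != n):
--             out.append(n)
--     return out
-- ===== Notes on version B (the rewrite author's own statement) =====
-- stated objective: alternative
-- what changed: A dedupes on the fly with a seen-set plus an ordered list and sorts at the end; B uses sort-then-scan: it parses every item into a plain list, sorts it, and a single linear scan both filters 1..12 and removes duplicates by comparing each element with the last one emitted - no set and no dedup structure at all.
import Mathlib
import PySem

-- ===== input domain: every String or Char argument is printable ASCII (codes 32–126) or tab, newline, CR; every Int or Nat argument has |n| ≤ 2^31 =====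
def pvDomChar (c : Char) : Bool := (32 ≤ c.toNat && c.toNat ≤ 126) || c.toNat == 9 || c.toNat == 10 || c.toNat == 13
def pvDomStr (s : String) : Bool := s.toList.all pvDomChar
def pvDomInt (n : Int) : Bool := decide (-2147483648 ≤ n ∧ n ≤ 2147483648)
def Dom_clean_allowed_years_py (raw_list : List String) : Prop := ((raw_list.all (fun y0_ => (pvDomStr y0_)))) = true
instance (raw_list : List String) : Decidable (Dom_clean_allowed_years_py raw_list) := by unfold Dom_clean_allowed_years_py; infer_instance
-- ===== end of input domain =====

-- B replaces A's single-pass set-dedup-then-sort by sort-then-adjacent-scan: parse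
-- everything first, sort, then one linear scan dedupes by comparing with the last
-- emitted element and filters 1..12 — no set at all (objective: alternative).


-- ===== PORT A =====
-- loop body of A: try int(item); if 1 <= n <= 12 and n not in seen: seen.add(n); years.append(n)
def cleanYearsStepA (st : List Int × PySem.Set Int) (item : String) : List Int × PySem.Set Int :=
  match PySem.Int.ofStr? item with
  | none => st
  | some n =>
    if 1 ≤ n ∧ n ≤ 12 ∧ ¬ (PySem.Set.contains st.2 n = true) then
      (st.1 ++ [n], PySem.Set.add st.2 n)
    else st

def clean_allowed_years_py (raw_list : List String) : List Int :=
  let st := (if raw_list = [] then [] else raw_list).foldl cleanYearsStepA ([], PySem.Set.empty)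
  PySem.List.sorted st.1 (fun x => x) false

-- ===== PORT B =====
-- first loop of B: try int(item); nums.append(n)  (errors swallowed)
def cleanYearsParseB (nums : List Int) (item : String) : List Int :=
  match PySem.Int.ofStr? item with
  | none => nums
  | some n => nums ++ [n]

-- second loop of B: if 1 <= n <= 12 and (not out or out[-1] != n): out.append(n)
def cleanYearsEmitB (out : List Int) (n : Int) : List Int :=
  if 1 ≤ n ∧ n ≤ 12 ∧ (out = [] ∨ PySem.List.pyGet? out (-1) ≠ some n) then out ++ [n]
  else out

def clean_allowed_years_py_alt (raw_list : List String) : List Int :=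
  let nums := (if raw_list = [] then [] else raw_list).foldl cleanYearsParseB []
  let sortedNums := PySem.List.sorted nums (fun x => x) false
  sortedNums.foldl cleanYearsEmitB []

-- ===== PRECONDITION & SPEC =====
def Spec_clean_allowed_years_py (raw_list : List String) (out : List Int) : Prop := out = clean_allowed_years_py_alt raw_list
instance (raw_list : List String) (out : List Int) : Decidable (Spec_clean_allowed_years_py raw_list out) := by unfold Spec_clean_allowed_years_py; infer_instance

-- ===== CLAIM (what is proved, stated in full; the proofs are below) =====
def Claim_equal_clean_allowed_years_py : Prop := ∀ (raw_list : List String), Dom_clean_allowed_years_py raw_list → Spec_clean_allowed_years_py raw_list (clean_allowed_years_py raw_list)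

-- ===== LEMMAS AND PROOFS =====

-- A's loop: characterisation of the accumulated (years, seen) pair
theorem aFold_char (l : List String) : ∀ (ys : List Int) (s : PySem.Set Int),
    ys.Nodup → (∀ n, PySem.Set.contains s n = true ↔ n ∈ ys) →
    (l.foldl cleanYearsStepA (ys, s)).1.Nodup ∧
    (∀ n, PySem.Set.contains (l.foldl cleanYearsStepA (ys, s)).2 n = true ↔ n ∈ (l.foldl cleanYearsStepA (ys, s)).1) ∧
    (∀ n, n ∈ (l.foldl cleanYearsStepA (ys, s)).1 ↔
      n ∈ ys ∨ (1 ≤ n ∧ n ≤ 12 ∧ ∃ it ∈ l, PySem.Int.ofStr? it = some n)) := by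
  induction l with
  | nil => intro ys s hnd hinv; refine ⟨hnd, hinv, ?_⟩; simp
  | cons it l ih =>
    intro ys s hnd hinv
    simp only [List.foldl_cons]
    rcases hp : PySem.Int.ofStr? it with _ | n
    · have hstep : cleanYearsStepA (ys, s) it = (ys, s) := by
        simp [cleanYearsStepA, hp]
      rw [hstep]
      obtain ⟨h1, h2, h3⟩ := ih ys s hnd hinv
      refine ⟨h1, h2, fun n => ?_⟩
      rw [h3 n]
      constructor
      · rintro (h | ⟨ha, hb, x, hx, he⟩)
        · exact Or.inl h
        · exact Or.inr ⟨ha, hb, x, List.mem_cons_of_mem _ hx, he⟩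
      · rintro (h | ⟨ha, hb, x, hx, he⟩)
        · exact Or.inl h
        · rcases List.mem_cons.mp hx with rfl | hx
          · rw [hp] at he; cases he
          · exact Or.inr ⟨ha, hb, x, hx, he⟩
    · by_cases hc : 1 ≤ n ∧ n ≤ 12 ∧ ¬ (PySem.Set.contains s n = true)
      · have hstep : cleanYearsStepA (ys, s) it = (ys ++ [n], PySem.Set.add s n) := by
          simp only [cleanYearsStepA, hp]; rw [if_pos hc]
        rw [hstep]
        have hnmem : n ∉ ys := fun h => hc.2.2 ((hinv n).mpr h)
        have hnd' : (ys ++ [n]).Nodup := by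
          simp only [List.nodup_append, List.nodup_singleton, true_and]
          refine ⟨hnd, ?_⟩
          intro a ha b hb
          simp only [List.mem_singleton] at hb
          exact fun h => hnmem ((h.trans hb) ▸ ha)
        have hinv' : ∀ m, PySem.Set.contains (PySem.Set.add s n) m = true ↔ m ∈ ys ++ [n] := by
          intro m
          rw [PySem.Set.contains_iff, PySem.Set.mem_add]
          simp only [List.mem_append, List.mem_singleton]
          rw [← PySem.Set.contains_iff, hinv m]
        obtain ⟨h1, h2, h3⟩ := ih (ys ++ [n]) (PySem.Set.add s n) hnd' hinv'
        refine ⟨h1, h2, fun m => ?_⟩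
        rw [h3 m]
        constructor
        · rintro (h | ⟨ha, hb, x, hx, he⟩)
          · rcases List.mem_append.mp h with h | h
            · exact Or.inl h
            · have : m = n := by simpa using h
              exact Or.inr ⟨this ▸ hc.1, this ▸ hc.2.1, it, List.mem_cons_self .., this ▸ hp⟩
          · exact Or.inr ⟨ha, hb, x, List.mem_cons_of_mem _ hx, he⟩
        · rintro (h | ⟨ha, hb, x, hx, he⟩)
          · exact Or.inl (List.mem_append.mpr (Or.inl h))
          · rcases List.mem_cons.mp hx with rfl | hx
            · rw [hp] at he
              have : m = n := (Option.some.inj he).symm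
              exact Or.inl (List.mem_append.mpr (Or.inr (by simp [this])))
            · exact Or.inr ⟨ha, hb, x, hx, he⟩
      · have hstep : cleanYearsStepA (ys, s) it = (ys, s) := by
          simp only [cleanYearsStepA, hp]; rw [if_neg hc]
        rw [hstep]
        obtain ⟨h1, h2, h3⟩ := ih ys s hnd hinv
        refine ⟨h1, h2, fun m => ?_⟩
        rw [h3 m]
        constructor
        · rintro (h | ⟨ha, hb, x, hx, he⟩)
          · exact Or.inl h
          · exact Or.inr ⟨ha, hb, x, List.mem_cons_of_mem _ hx, he⟩
        · rintro (h | ⟨ha, hb, x, hx, he⟩)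
          · exact Or.inl h
          · rcases List.mem_cons.mp hx with rfl | hx
            · rw [hp] at he
              have heq : m = n := (Option.some.inj he).symm
              subst heq
              push Not at hc
              by_cases hm : m ∈ ys
              · exact Or.inl hm
              · exact absurd ((hinv m).mp (hc ha hb)) hm
            · exact Or.inr ⟨ha, hb, x, hx, he⟩

-- B's parse loop: membership in the accumulated list of parsed ints
theorem bParse_mem (l : List String) : ∀ (acc : List Int) (n : Int),
    n ∈ l.foldl cleanYearsParseB acc ↔ n ∈ acc ∨ ∃ it ∈ l, PySem.Int.ofStr? it = some n := by
  induction l with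
  | nil => intro acc n; simp
  | cons it l ih =>
    intro acc n
    simp only [List.foldl_cons]
    rcases hp : PySem.Int.ofStr? it with _ | m
    · have hstep : cleanYearsParseB acc it = acc := by simp [cleanYearsParseB, hp]
      rw [hstep, ih]
      constructor
      · rintro (h | ⟨x, hx, he⟩)
        · exact Or.inl h
        · exact Or.inr ⟨x, List.mem_cons_of_mem _ hx, he⟩
      · rintro (h | ⟨x, hx, he⟩)
        · exact Or.inl h
        · rcases List.mem_cons.mp hx with rfl | hx
          · rw [hp] at he; cases he
          · exact Or.inr ⟨x, hx, he⟩
    · have hstep : cleanYearsParseB acc it = acc ++ [m] := by simp [cleanYearsParseB, hp]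
      rw [hstep, ih]
      constructor
      · rintro (h | ⟨x, hx, he⟩)
        · rcases List.mem_append.mp h with h | h
          · exact Or.inl h
          · have : n = m := by simpa using h
            exact Or.inr ⟨it, List.mem_cons_self .., this ▸ hp⟩
        · exact Or.inr ⟨x, List.mem_cons_of_mem _ hx, he⟩
      · rintro (h | ⟨x, hx, he⟩)
        · exact Or.inl (List.mem_append.mpr (Or.inl h))
        · rcases List.mem_cons.mp hx with rfl | hx
          · rw [hp] at he
            exact Or.inl (List.mem_append.mpr (Or.inr (by simp [Option.some.inj he])))
          · exact Or.inr ⟨x, hx, he⟩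

-- B's emit loop over a ≤-sorted list: output strictly increasing, members = valid input members
theorem bEmit_char (l : List Int) : ∀ (acc : List Int),
    l.Pairwise (· ≤ ·) → acc.Pairwise (· < ·) → (∀ a ∈ acc, ∀ b ∈ l, a ≤ b) →
    (l.foldl cleanYearsEmitB acc).Pairwise (· < ·) ∧
    (∀ n, n ∈ l.foldl cleanYearsEmitB acc ↔ n ∈ acc ∨ (1 ≤ n ∧ n ≤ 12 ∧ n ∈ l)) := by
  induction l with
  | nil => intro acc _ hacc _; refine ⟨hacc, fun n => ?_⟩; simp
  | cons m l ih =>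
    intro acc hl hacc hle
    have hl' : l.Pairwise (· ≤ ·) := hl.tail
    have hml : ∀ b ∈ l, m ≤ b := fun b hb => List.rel_of_pairwise_cons hl hb
    simp only [List.foldl_cons]
    by_cases hc : 1 ≤ m ∧ m ≤ 12 ∧ (acc = [] ∨ PySem.List.pyGet? acc (-1) ≠ some m)
    · have hstep : cleanYearsEmitB acc m = acc ++ [m] := by
        unfold cleanYearsEmitB; rw [if_pos hc]
      rw [hstep]
      -- every element of acc is strictly below m
      have hlt : ∀ a ∈ acc, a < m := by
        intro a ha
        have hale : a ≤ m := hle a ha m (List.mem_cons_self ..)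
        rcases lt_or_eq_of_le hale with h | h
        · exact h
        · -- a = m : then the last element of acc is m, contradicting the guard
          exfalso
          subst h
          rcases hc.2.2 with hnil | hlast
          · exact (List.ne_nil_of_mem ha) hnil
          · -- getLast acc ≥ a (acc sorted <) and getLast ≤ a (hle) → getLast = a
            have hne : acc ≠ [] := List.ne_nil_of_mem ha
            have hg : PySem.List.pyGet? acc (-1) = acc.getLast? := PySem.List.pyGet?_neg_one acc
            have hlm : acc.getLast hne ∈ acc := List.getLast_mem hne
            have h1 : acc.getLast hne ≤ a := hle _ hlm a (List.mem_cons_self ..)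
            have h2 : a ≤ acc.getLast hne :=
              List.Pairwise.rel_getLast (List.Pairwise.imp le_of_lt hacc) ha
            have : acc.getLast hne = a := le_antisymm h1 h2
            exact hlast (by rw [hg, List.getLast?_eq_some_getLast hne, this])
      have hacc' : (acc ++ [m]).Pairwise (· < ·) := by
        rw [List.pairwise_append]
        exact ⟨hacc, List.pairwise_singleton _ _, by
          intro a ha b hb; rw [List.mem_singleton] at hb; subst hb; exact hlt a ha⟩
      have hle' : ∀ a ∈ acc ++ [m], ∀ b ∈ l, a ≤ b := by
        intro a ha b hb
        rcases List.mem_append.mp ha with h | h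
        · exact hle a h b (List.mem_cons_of_mem _ hb)
        · have : a = m := by simpa using h
          exact this ▸ hml b hb
      obtain ⟨h1, h2⟩ := ih (acc ++ [m]) hl' hacc' hle'
      refine ⟨h1, fun n => ?_⟩
      rw [h2 n]
      constructor
      · rintro (h | ⟨ha, hb, hm⟩)
        · rcases List.mem_append.mp h with h | h
          · exact Or.inl h
          · have : n = m := by simpa using h
            exact Or.inr ⟨this ▸ hc.1, this ▸ hc.2.1, this ▸ List.mem_cons_self ..⟩
        · exact Or.inr ⟨ha, hb, List.mem_cons_of_mem _ hm⟩
      · rintro (h | ⟨ha, hb, hm⟩)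
        · exact Or.inl (List.mem_append.mpr (Or.inl h))
        · rcases List.mem_cons.mp hm with rfl | hm
          · exact Or.inl (List.mem_append.mpr (Or.inr (by simp)))
          · exact Or.inr ⟨ha, hb, hm⟩
    · have hstep : cleanYearsEmitB acc m = acc := by
        unfold cleanYearsEmitB; rw [if_neg hc]
      rw [hstep]
      have hle' : ∀ a ∈ acc, ∀ b ∈ l, a ≤ b :=
        fun a ha b hb => hle a ha b (List.mem_cons_of_mem _ hb)
      obtain ⟨h1, h2⟩ := ih acc hl' hacc hle'
      refine ⟨h1, fun n => ?_⟩
      rw [h2 n]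
      constructor
      · rintro (h | ⟨ha, hb, hm⟩)
        · exact Or.inl h
        · exact Or.inr ⟨ha, hb, List.mem_cons_of_mem _ hm⟩
      · rintro (h | ⟨ha, hb, hm⟩)
        · exact Or.inl h
        · rcases List.mem_cons.mp hm with rfl | hm
          · -- guard failed: either n outside 1..12 (contradiction) or last of acc = n → n ∈ acc
            push Not at hc
            rcases hc ha hb with ⟨hne, hlast⟩
            have hg : PySem.List.pyGet? acc (-1) = acc.getLast? := PySem.List.pyGet?_neg_one acc
            rw [hg] at hlast
            have : n ∈ acc := by
              rw [List.getLast?_eq_some_getLast hne] at hlast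
              have := Option.some.inj hlast
              rw [← this]; exact List.getLast_mem hne
            exact Or.inl this
          · exact Or.inr ⟨ha, hb, hm⟩

-- ===== VERDICT (by name: the statement is the Claim_ definition above) =====
theorem clean_allowed_years_py_spec : Claim_equal_clean_allowed_years_py := by
  intro raw_list _
  unfold Spec_clean_allowed_years_py clean_allowed_years_py clean_allowed_years_py_alt
  set l := (if raw_list = [] then [] else raw_list) with hl
  simp only []
  -- A side characterisation
  obtain ⟨hnd, _, hmemA⟩ := aFold_char l [] PySem.Set.empty List.nodup_nil (by
    intro n; simp [PySem.Set.empty])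
  -- B side
  set nums := l.foldl cleanYearsParseB [] with hnums
  set sn := PySem.List.sorted nums (fun x => x) false with hsn
  have hsnp : sn.Pairwise (· ≤ ·) := by
    have := PySem.List.sorted_pairwise (xs := nums) (key := fun x => x)
    simpa using this
  obtain ⟨hBp, hBmem⟩ := bEmit_char sn [] hsnp List.Pairwise.nil (by intro a ha; simp at ha)
  set B := sn.foldl cleanYearsEmitB [] with hB
  have hBnd : B.Nodup := hBp.imp (fun h => ne_of_lt h)
  have hmemB : ∀ n, n ∈ B ↔ 1 ≤ n ∧ n ≤ 12 ∧ ∃ it ∈ l, PySem.Int.ofStr? it = some n := by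
    intro n
    rw [hB, hBmem n]
    have hmemsn : n ∈ sn ↔ n ∈ nums := PySem.List.mem_sorted nums (fun x => x) false n
    rw [hmemsn, bParse_mem l [] n]
    simp
  have hperm : B.Perm (l.foldl cleanYearsStepA ([], PySem.Set.empty)).1 := by
    rw [List.perm_ext_iff_of_nodup hBnd hnd]
    intro n
    rw [hmemB n, hmemA n]
    simp
  exact (PySem.List.sorted_eq_of_perm_of_pairwise_lt (key := fun x => x) (hp := hperm) (hs := hBp.imp id)).symm ▸
    (PySem.List.sorted_eq_of_perm_of_pairwise_lt (key := fun x => x) (hp := hperm) (hs := by simpa using hBp))
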